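-- pv_equiv track=rewrite | github.com/krzysztofkub/AdventOfCode | Day9/first.py | calc_val
-- ===== SOURCE A (Python) =====
-- def calc_val(numbers):
--     last_numbers = [numbers[-1]]
--     while True:
--         numbers = [numbers[i + 1] - numbers[i] for i in range(len(numbers) - 1)]
--         last_numbers.append(numbers[-1])
--
--         if len(set(numbers)) == 1:
--             break
--
--     return sum(last_numbers)
-- ===== SOURCE B (Python) =====
-- # Closed form: the result is the Newton-forward extrapolation
-- # sum_i (-1)^(n-1-i) * C(n, i) * numbers[i]; computed in one pass with
-- # incrementally updated binomial coefficients, no difference table at all.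
-- def calc_val(numbers):
--     n = len(numbers)
--     total = 0
--     c = 1                            # C(n, i)
--     sign = -1 if (n - 1) % 2 else 1  # (-1)^(n-1-i)
--     i = 0
--     for x in numbers:
--         total += sign * c * x
--         c = c * (n - i) // (i + 1)
--         sign = -sign
--         i += 1
--     return total
-- ===== Notes on version B (the rewrite author's own statement) =====
-- stated objective: faster
-- what changed: B replaces the whole difference-table loop by the Newton-forward-extrapolation closed form sum_i (-1)^(n-1-i)*C(n,i)*numbers[i], computed in one pass with incrementally updated binomial coefficients.
import Mathlib
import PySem

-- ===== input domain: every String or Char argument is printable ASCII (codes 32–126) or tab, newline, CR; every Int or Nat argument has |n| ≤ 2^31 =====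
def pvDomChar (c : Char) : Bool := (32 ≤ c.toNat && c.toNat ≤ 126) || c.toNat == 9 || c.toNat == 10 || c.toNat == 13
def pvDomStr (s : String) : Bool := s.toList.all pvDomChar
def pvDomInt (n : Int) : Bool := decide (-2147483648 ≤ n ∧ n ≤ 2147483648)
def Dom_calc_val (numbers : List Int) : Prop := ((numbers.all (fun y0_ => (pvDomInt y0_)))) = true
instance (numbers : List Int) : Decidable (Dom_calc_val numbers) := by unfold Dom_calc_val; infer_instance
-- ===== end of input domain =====

-- B replaces A's difference-table loop by the Newton-forward closed form
-- sum_i (-1)^(n-1-i)*C(n,i)*numbers[i] in one pass (measured faster, asymptotic).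


-- ===== PORT A =====
-- numbers = [numbers[i+1] - numbers[i] for i in range(len(numbers)-1)]
def pvDiffA (numbers : List Int) : List Int :=
  (PySem.List.pyRange 0 ((numbers.length : Int) - 1) 1).map
    (fun i => PySem.List.pyGetD numbers (i + 1) 0 - PySem.List.pyGetD numbers i 0)

-- the 'while True' loop; fuel = len(numbers) suffices since each row is one shorter
-- and a length-1 row always has len(set(row)) == 1
def pvLoopA : Nat → List Int → List Int → List Int
  | 0, _, acc => acc
  | f + 1, numbers, acc =>
      let d := pvDiffA numbers
      if (PySem.Set.ofList d).length = 1 then acc ++ [PySem.List.pyGetD d (-1) 0]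
      else pvLoopA f d (acc ++ [PySem.List.pyGetD d (-1) 0])

def calc_val (numbers : List Int) : Int :=
  (pvLoopA numbers.length numbers [PySem.List.pyGetD numbers (-1) 0]).sum

-- ===== PORT B =====
-- loop body: total += sign*c*x; c = c*(n-i)//(i+1); sign = -sign; i += 1
-- state (total, c, sign, i)
def pvStepB (n : Int) (st : Int × Int × Int × Int) (x : Int) : Int × Int × Int × Int :=
  (st.1 + st.2.2.1 * st.2.1 * x,
   PySem.Int.floordiv (st.2.1 * (n - st.2.2.2)) (st.2.2.2 + 1),
   -st.2.2.1,
   st.2.2.2 + 1)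

def calc_val_alt (numbers : List Int) : Int :=
  (numbers.foldl (pvStepB (numbers.length : Int))
    (0, 1,
     (if PySem.Int.mod ((numbers.length : Int) - 1) 2 ≠ 0 then (-1 : Int) else 1),
     0)).1

-- ===== PRECONDITION & SPEC =====
-- Pre_ excludes lists of length < 2, on which A raises IndexError (numbers[-1] on an empty row).
def Pre_calc_val (numbers : List Int) : Prop := 2 ≤ numbers.length
instance (numbers : List Int) : Decidable (Pre_calc_val numbers) := by unfold Pre_calc_val; infer_instance
def pvWitness_calc_val : List Int := [1, 2, 4]

def Spec_calc_val (numbers : List Int) (out : Int) : Prop := out = calc_val_alt numbers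
instance (numbers : List Int) (out : Int) : Decidable (Spec_calc_val numbers out) := by unfold Spec_calc_val; infer_instance

-- ===== CLAIM (what is proved, stated in full; the proofs are below) =====
def Claim_equal_calc_val : Prop := ∀ (numbers : List Int), Dom_calc_val numbers → Pre_calc_val numbers → Spec_calc_val numbers (calc_val numbers)

-- ===== LEMMAS AND PROOFS =====

-- proof-side difference row
def pvDiff (row : List Int) : List Int :=
  (row.zip row.tail).map (fun p => p.2 - p.1)

-- the sequence of last elements added when differencing m more times from row xs
def pvLasts : Nat → List Int → List Int
  | 0, _ => []
  | m + 1, xs => PySem.List.pyGetD (pvDiff xs) (-1) 0 :: pvLasts m (pvDiff xs)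

-- closed-form summand: gsum n k xs = Σ_j (-1)^(n-1+k+j) C(n,k+j) xs[j]
def pvGsum (n : Nat) (k : Nat) : List Int → Int
  | [] => 0
  | x :: ys => (-1 : Int) ^ (n - 1 + k) * (n.choose k : Int) * x + pvGsum n (k + 1) ys

lemma pvDiff_length (xs : List Int) : (pvDiff xs).length = xs.length - 1 := by
  simp [pvDiff, List.length_tail]

lemma pvDiffA_eq (xs : List Int) : pvDiffA xs = pvDiff xs := by
  have hlen : (pvDiffA xs).length = (pvDiff xs).length := by
    simp [pvDiffA, pvDiff, PySem.List.length_pyRange_one, List.length_tail]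
  refine List.ext_getElem hlen ?_
  intro k h1 h2
  have hk : (k : Int) < (xs.length : Int) - 1 := by
    have h1' := h1
    simp [pvDiffA, PySem.List.length_pyRange_one] at h1'
    omega
  simp only [pvDiffA, pvDiff, List.getElem_map, PySem.List.getElem_pyRange_one,
    List.getElem_zip, List.getElem_tail]
  rw [PySem.List.pyGetD_eq_getElem _ _ (by omega) (by omega),
      PySem.List.pyGetD_eq_getElem _ _ (by omega) (by omega)]
  simp only [show ((0 : Int) + (k : Int) + 1).toNat = k + 1 from by omega,
    show ((0 : Int) + (k : Int)).toNat = k from by omega]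

lemma mem_pvDiff {x : Int} {xs : List Int} (h : x ∈ pvDiff xs) :
    ∃ a ∈ xs, ∃ b ∈ xs, x = b - a := by
  simp only [pvDiff, List.mem_map] at h
  obtain ⟨⟨a, b⟩, hp, rfl⟩ := h
  exact ⟨a, (List.of_mem_zip hp).1, b, List.mem_of_mem_tail (List.of_mem_zip hp).2, rfl⟩

lemma pvDiff_zero {xs : List Int} (h : ∀ x ∈ xs, ∀ y ∈ xs, x = y) :
    ∀ x ∈ pvDiff xs, x = 0 := by
  intro x hx
  obtain ⟨a, ha, b, hb, rfl⟩ := mem_pvDiff hx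
  have := h a ha b hb; omega

lemma last_zero {xs : List Int} (h : ∀ x ∈ xs, x = 0) :
    PySem.List.pyGetD xs (-1) 0 = 0 := by
  cases xs with
  | nil => decide
  | cons a t =>
      rw [PySem.List.pyGetD_neg_one _ _ (by simp)]
      exact h _ (List.getLast_mem _)

lemma pvLasts_zero {xs : List Int} (h : ∀ x ∈ xs, x = 0) (m : Nat) :
    (pvLasts m xs).sum = 0 := by
  induction m generalizing xs with
  | zero => simp [pvLasts]
  | succ m ih =>
      have hz : ∀ x ∈ pvDiff xs, x = 0 := pvDiff_zero (fun x hx y hy => by rw [h x hx, h y hy])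
      simp [pvLasts, last_zero hz, ih hz]

lemma pvLasts_const {d : List Int} (h : ∀ x ∈ d, ∀ y ∈ d, x = y) (m : Nat) :
    (pvLasts m d).sum = 0 := by
  induction m generalizing d with
  | zero => simp [pvLasts]
  | succ m _ =>
      simp [pvLasts, last_zero (pvDiff_zero h), pvLasts_zero (pvDiff_zero h)]

lemma const_of_setlen {d : List Int} (h : (PySem.Set.ofList d).length = 1) :
    ∀ x ∈ d, ∀ y ∈ d, x = y := by
  obtain ⟨a, ha⟩ := List.length_eq_one_iff.mp h
  intro x hx y hy
  have hx' : x ∈ PySem.Set.ofList d := (PySem.Set.mem_ofList d x).mpr hx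
  have hy' : y ∈ PySem.Set.ofList d := (PySem.Set.mem_ofList d y).mpr hy
  rw [ha, List.mem_singleton] at hx' hy'
  rw [hx', hy']

lemma setlen_singleton (x : Int) : (PySem.Set.ofList [x]).length = 1 := by
  simp [PySem.Set.ofList, PySem.Set.add, PySem.Set.empty]

lemma loopA_sum : ∀ (fuel : Nat) (xs acc : List Int), 2 ≤ xs.length → xs.length ≤ fuel →
    (pvLoopA fuel xs acc).sum = acc.sum + (pvLasts (xs.length - 1) xs).sum := by
  intro fuel
  induction fuel with
  | zero => intro xs acc h1 h2; omega
  | succ f ih =>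
      intro xs acc h1 h2
      have hlen : (pvDiff xs).length = xs.length - 1 := pvDiff_length xs
      have hm : xs.length - 1 = (xs.length - 2) + 1 := by omega
      rw [pvLoopA]
      simp only [pvDiffA_eq]
      split_ifs with hc
      · rw [hm]
        simp [pvLasts, pvLasts_const (const_of_setlen hc)]
      · have hd2 : 2 ≤ (pvDiff xs).length := by
          rcases hd : pvDiff xs with _ | ⟨a, _ | ⟨b, t⟩⟩
          · exfalso; rw [hd] at hlen; simp at hlen; omega
          · exact absurd (by rw [hd] at hc; exact hc (setlen_singleton a)) not_false
          · simp
        rw [ih (pvDiff xs) (acc ++ [PySem.List.pyGetD (pvDiff xs) (-1) 0]) hd2 (by omega)]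
        rw [hm]
        simp only [pvLasts, List.sum_append, List.sum_cons, List.sum_nil, hlen,
          show xs.length - 1 - 1 = xs.length - 2 from by omega]
        ring

-- ===== B-side lemmas =====

lemma choose_step (n k : Nat) (hk : k < n) :
    PySem.Int.floordiv ((n.choose k : Int) * ((n : Int) - (k : Int))) ((k : Int) + 1)
      = (n.choose (k + 1) : Int) := by
  have h1 : (n : Int) - (k : Int) = ((n - k : Nat) : Int) := by omega
  have h2 : ((k : Int) + 1) = ((k + 1 : Nat) : Int) := by push_cast; ring
  rw [h1, h2, ← Nat.cast_mul, PySem.Int.floordiv_natCast]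
  have h3 : n.choose k * (n - k) = n.choose (k + 1) * (k + 1) :=
    (Nat.choose_succ_right_eq n k).symm
  rw [h3, Nat.mul_div_cancel _ (by omega)]

lemma foldB_inv (n : Nat) : ∀ (ys : List Int) (k : Nat) (t : Int), k + ys.length = n →
    (ys.foldl (pvStepB (n : Int))
      (t, (n.choose k : Int), (-1 : Int) ^ (n - 1 + k), (k : Int))).1
    = t + pvGsum n k ys := by
  intro ys
  induction ys with
  | nil => intro k t h; simp [pvGsum]
  | cons x ys ih =>
      intro k t h
      have hk : k < n := by simp at h; omega
      rw [List.foldl_cons]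
      have hstep : pvStepB (n : Int) (t, (n.choose k : Int), (-1 : Int) ^ (n - 1 + k), (k : Int)) x
          = (t + (-1 : Int) ^ (n - 1 + k) * (n.choose k : Int) * x,
             (n.choose (k + 1) : Int), (-1 : Int) ^ (n - 1 + (k + 1)), ((k + 1 : Nat) : Int)) := by
        simp only [pvStepB, choose_step n k hk, Prod.mk.injEq]
        refine ⟨trivial, trivial, ?_, by push_cast; ring⟩
        rw [show n - 1 + (k + 1) = (n - 1 + k) + 1 from by omega, pow_succ]
        ring
      rw [hstep, ih (k + 1) _ (by simp at h ⊢; omega)]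
      simp [pvGsum]; ring

lemma initial_sign (n : Nat) (hn : 1 ≤ n) :
    (if PySem.Int.mod ((n : Int) - 1) 2 ≠ 0 then (-1 : Int) else 1) = (-1 : Int) ^ (n - 1) := by
  have h1 : ((n : Int) - 1) = ((n - 1 : Nat) : Int) := by omega
  rw [h1, show ((2 : Int)) = ((2 : Nat) : Int) from rfl, PySem.Int.mod_natCast]
  rcases Nat.even_or_odd (n - 1) with he | ho
  · have : (n - 1) % 2 = 0 := Nat.even_iff.mp he
    simp [this, he.neg_one_pow]
  · have : (n - 1) % 2 = 1 := Nat.odd_iff.mp ho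
    simp [this, ho.neg_one_pow]

lemma calc_val_alt_eq_gsum (xs : List Int) (h : 1 ≤ xs.length) :
    calc_val_alt xs = pvGsum xs.length 0 xs := by
  unfold calc_val_alt
  rw [initial_sign xs.length h]
  have := foldB_inv xs.length xs 0 0 (by simp)
  simpa using this

lemma pvGsum_eq_finset (xs : List Int) : ∀ (n k : Nat),
    pvGsum n k xs = ∑ j ∈ Finset.range xs.length,
      (-1 : Int) ^ (n - 1 + k + j) * (n.choose (k + j) : Int) * xs.getD j 0 := by
  induction xs with
  | nil => intro n k; simp [pvGsum]
  | cons x ys ih =>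
      intro n k
      have hs : (∑ j ∈ Finset.range ys.length,
            (-1 : Int) ^ (n - 1 + k + (j + 1)) * (n.choose (k + (j + 1)) : Int) * ys.getD j 0)
          = ∑ j ∈ Finset.range ys.length,
            (-1 : Int) ^ (n - 1 + (k + 1) + j) * (n.choose (k + 1 + j) : Int) * ys.getD j 0 := by
        apply Finset.sum_congr rfl
        intro j _
        rw [show n - 1 + k + (j + 1) = n - 1 + (k + 1) + j from by omega,
            show k + (j + 1) = k + 1 + j from by omega]
      rw [show (x :: ys).length = ys.length + 1 from rfl,
        Finset.sum_range_succ' (fun j => (-1 : Int) ^ (n - 1 + k + j) * (n.choose (k + j) : Int) * (x :: ys).getD j 0) ys.length]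
      simp only [List.getD_cons_succ, List.getD_cons_zero, Nat.add_zero]
      rw [hs, pvGsum, ih n (k + 1)]
      ring

-- the Pascal-telescoping identity behind 'extrapolation = last + extrapolation of differences'
lemma key_identity (p : Nat) (a : Nat → Int) :
    ∑ j ∈ Finset.range (p + 2), (-1 : Int) ^ (p + 1 + j) * ((p + 2).choose j : Int) * a j
    = a (p + 1) + ∑ j ∈ Finset.range (p + 1),
        (-1 : Int) ^ (p + j) * ((p + 1).choose j : Int) * (a (j + 1) - a j) := by
  -- abbreviations
  have hL : ∑ j ∈ Finset.range (p + 2), (-1 : Int) ^ (p + 1 + j) * ((p + 2).choose j : Int) * a j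
      = (∑ j ∈ Finset.range (p + 1), (-1 : Int) ^ (p + 1 + (j + 1)) * ((p + 2).choose (j + 1) : Int) * a (j + 1))
        + (-1 : Int) ^ (p + 1) * a 0 := by
    rw [Finset.sum_range_succ' (fun j => (-1 : Int) ^ (p + 1 + j) * ((p + 2).choose j : Int) * a j) (p + 1)]
    simp
  rw [hL]
  -- split the pascal coefficient
  have hsplit : ∀ j, j ∈ Finset.range (p + 1) →
      (-1 : Int) ^ (p + 1 + (j + 1)) * ((p + 2).choose (j + 1) : Int) * a (j + 1)
      = (-1 : Int) ^ (p + j) * ((p + 1).choose j : Int) * a (j + 1)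
        + (-1 : Int) ^ (p + j) * ((p + 1).choose (j + 1) : Int) * a (j + 1) := by
    intro j _
    rw [show p + 1 + (j + 1) = (p + j) + 2 from by omega, pow_add,
        show (p + 2).choose (j + 1) = (p + 1).choose j + (p + 1).choose (j + 1) from
          Nat.choose_succ_succ (p + 1) j]
    push_cast; ring
  rw [Finset.sum_congr rfl hsplit, Finset.sum_add_distrib]
  -- the second piece: peel the top term (j = p), where C(p+1,p+1)=1 and sign = +1
  have hsecond : ∑ j ∈ Finset.range (p + 1), (-1 : Int) ^ (p + j) * ((p + 1).choose (j + 1) : Int) * a (j + 1)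
      = (∑ j ∈ Finset.range p, (-1 : Int) ^ (p + j) * ((p + 1).choose (j + 1) : Int) * a (j + 1)) + a (p + 1) := by
    rw [Finset.sum_range_succ]
    have h1 : (-1 : Int) ^ (p + p) = 1 := by
      rw [show p + p = 2 * p from by omega, pow_mul]
      norm_num
    simp [h1, Nat.choose_self]
  rw [hsecond]
  -- right-hand side: distribute and reindex
  have hRsub : ∑ j ∈ Finset.range (p + 1), (-1 : Int) ^ (p + j) * ((p + 1).choose j : Int) * (a (j + 1) - a j)
      = (∑ j ∈ Finset.range (p + 1), (-1 : Int) ^ (p + j) * ((p + 1).choose j : Int) * a (j + 1))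
        - (∑ j ∈ Finset.range (p + 1), (-1 : Int) ^ (p + j) * ((p + 1).choose j : Int) * a j) := by
    rw [← Finset.sum_sub_distrib]
    apply Finset.sum_congr rfl
    intro j _; ring
  have hRa : ∑ j ∈ Finset.range (p + 1), (-1 : Int) ^ (p + j) * ((p + 1).choose j : Int) * a j
      = (∑ j ∈ Finset.range p, (-1 : Int) ^ (p + (j + 1)) * ((p + 1).choose (j + 1) : Int) * a (j + 1))
        + (-1 : Int) ^ p * a 0 := by
    rw [Finset.sum_range_succ' (fun j => (-1 : Int) ^ (p + j) * ((p + 1).choose j : Int) * a j) p]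
    simp
  have hflip : ∑ j ∈ Finset.range p, (-1 : Int) ^ (p + (j + 1)) * ((p + 1).choose (j + 1) : Int) * a (j + 1)
      = - ∑ j ∈ Finset.range p, (-1 : Int) ^ (p + j) * ((p + 1).choose (j + 1) : Int) * a (j + 1) := by
    rw [← Finset.sum_neg_distrib]
    apply Finset.sum_congr rfl
    intro j _
    rw [show p + (j + 1) = (p + j) + 1 from by omega, pow_succ]
    ring
  rw [hRsub, hRa, hflip]
  have hsign : (-1 : Int) ^ (p + 1) = -(-1 : Int) ^ p := by rw [pow_succ]; ring
  rw [hsign]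
  ring

lemma pvDiff_getD (xs : List Int) (j : Nat) (hj : j + 1 < xs.length) :
    (pvDiff xs).getD j 0 = xs.getD (j + 1) 0 - xs.getD j 0 := by
  have hlen : (pvDiff xs).length = xs.length - 1 := pvDiff_length xs
  rw [List.getD_eq_getElem _ _ (by omega), List.getD_eq_getElem _ _ (by omega),
      List.getD_eq_getElem _ _ (by omega)]
  simp only [pvDiff, List.getElem_map, List.getElem_zip, List.getElem_tail]

-- G-recurrence: the closed form satisfies 'last + closed form of differences'
lemma gsum_diff (xs : List Int) (h : 2 ≤ xs.length) :
    pvGsum xs.length 0 xs = xs.getD (xs.length - 1) 0 + pvGsum (xs.length - 1) 0 (pvDiff xs) := by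
  obtain ⟨p, hp⟩ : ∃ p, xs.length = p + 2 := ⟨xs.length - 2, by omega⟩
  have hdl : (pvDiff xs).length = p + 1 := by rw [pvDiff_length, hp]; omega
  rw [pvGsum_eq_finset, pvGsum_eq_finset, hp, hdl]
  have e1 : ∀ j ∈ Finset.range (p + 2),
      (-1 : Int) ^ (p + 2 - 1 + 0 + j) * ((p + 2).choose (0 + j) : Int) * xs.getD j 0
      = (-1 : Int) ^ (p + 1 + j) * ((p + 2).choose j : Int) * xs.getD j 0 := by
    intro j _
    rw [show p + 2 - 1 + 0 + j = p + 1 + j from by omega, Nat.zero_add]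
  have e2 : ∀ j ∈ Finset.range (p + 1),
      (-1 : Int) ^ (p + 2 - 1 - 1 + 0 + j) * ((p + 2 - 1).choose (0 + j) : Int) * (pvDiff xs).getD j 0
      = (-1 : Int) ^ (p + j) * ((p + 1).choose j : Int) * (xs.getD (j + 1) 0 - xs.getD j 0) := by
    intro j hj
    rw [Finset.mem_range] at hj
    rw [show p + 2 - 1 - 1 + 0 + j = p + j from by omega, Nat.zero_add,
        show p + 2 - 1 = p + 1 from by omega,
        pvDiff_getD xs j (by omega)]
  rw [Finset.sum_congr rfl e1, Finset.sum_congr rfl e2,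
      show p + 2 - 1 = p + 1 from by omega]
  exact key_identity p (fun j => xs.getD j 0)

lemma pyGetD_last (ys : List Int) (h : 1 ≤ ys.length) :
    PySem.List.pyGetD ys (-1) 0 = ys.getD (ys.length - 1) 0 := by
  have hne : ys ≠ [] := by cases ys <;> simp_all
  rw [PySem.List.pyGetD_neg_one _ _ hne, List.getLast_eq_getElem,
      List.getD_eq_getElem _ _ (by omega)]

-- the full-depth last-sum equals the closed form, by induction on length
lemma lasts_eq_gsum : ∀ (n : Nat) (xs : List Int), xs.length = n → 1 ≤ n →
    xs.getD (xs.length - 1) 0 + (pvLasts (xs.length - 1) xs).sum = pvGsum n 0 xs := by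
  intro n
  induction n with
  | zero => intro xs h h1; omega
  | succ m ih =>
      intro xs hlen hm
      rcases Nat.eq_zero_or_pos m with hm0 | hm1
      · -- length 1
        subst hm0
        rcases xs with _ | ⟨x, _ | _⟩ <;> simp_all [pvLasts, pvGsum]
      · -- length m+1 ≥ 2
        obtain ⟨m', rfl⟩ : ∃ m', m = m' + 1 := ⟨m - 1, by omega⟩
        have hdl : (pvDiff xs).length = m' + 1 := by rw [pvDiff_length, hlen]; omega
        have hrec := ih (pvDiff xs) hdl (by omega)
        rw [hdl] at hrec
        have hgd := gsum_diff xs (by omega)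
        rw [hlen] at hgd
        rw [hlen]
        simp only [Nat.add_sub_cancel] at hrec hgd ⊢
        simp only [pvLasts, List.sum_cons]
        rw [pyGetD_last (pvDiff xs) (by omega), hdl, Nat.add_sub_cancel]
        rw [hgd, ← hrec]

theorem calc_val_spec : Claim_equal_calc_val := by
  intro numbers _ hpre
  unfold Spec_calc_val calc_val
  rw [loopA_sum numbers.length numbers _ hpre le_rfl,
      calc_val_alt_eq_gsum numbers (by unfold Pre_calc_val at hpre; omega),
      ← lasts_eq_gsum numbers.length numbers rfl (by unfold Pre_calc_val at hpre; omega)]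
  rw [pyGetD_last numbers (by unfold Pre_calc_val at hpre; omega)]
  simp
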